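-- pv_equiv track=rewrite | github.com/YG-im/Portfolio_YGim | Python Pakages/Interst things/Test for Duplicated Number.py | duplicate_num
-- ===== SOURCE A (Python) =====
-- def str_to_ls(string):  #문자열을 리스트로 바꿔주는 함수
--     Input_list = []
--     for i in string:
--         Input_list.append(i)
--     return Input_list
--
-- def duplicate_num(input_str):
--     #input에는 string을 넣으세요.
--     input_ls = str_to_ls(input_str)   #입력값을 list로 만들어준다.
--     input_ls.sort()                   #입력값을 sorting 시켜준다. 순서대로 만들어준다.
--     z_to_n = ['0', '1', '2', '3', '4', '5', '6', '7', '8', '9']  #비교군 데이터 입력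
--     i = 0
--     while i <= len(z_to_n):
--         if len(input_ls) != len(z_to_n):  # 순서대로 만들었는대도 두 list의 길이가 다르면 일단 다른것이니 false 출력
--             return False
--             break
--         elif i == len(z_to_n): # i를 차곡차곡 올려서 10개 성분에대한 검토가 끝나는 지점 체크
--             return True        # 루프가 무사히 끝났다면 z_to_n가 완전히 같다는 것이니 True출력.
--             break             # 루프를 끝낸다.
--         elif input_ls[i] == z_to_n[i]: # 첫번째 if 조건에서 길이가 같았으면 성분들도 같은지 테스트
--             i += 1                     # 같다는게 확인 될때마다 i를 1씩 높여주며 다음 성분을 비교한다.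
--         else:
--             return input_ls[i] == z_to_n[i] # 성분들이 같지 않다면 false를 출력하고 루프 멈춤.
--             break
-- ===== SOURCE B (Python) =====
-- def duplicate_num(input_str):
--     # simpler: length guard + one set comparison instead of sort + elementwise while loop
--     return len(input_str) == 10 and set(input_str) == set('0123456789')
-- ===== Notes on version B (the rewrite author's own statement) =====
-- stated objective: simpler
-- what changed: B replaces A's sort-then-indexwise while-loop comparison with a length guard plus a single set comparison against the set of the ten digit characters.
import Mathlib
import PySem

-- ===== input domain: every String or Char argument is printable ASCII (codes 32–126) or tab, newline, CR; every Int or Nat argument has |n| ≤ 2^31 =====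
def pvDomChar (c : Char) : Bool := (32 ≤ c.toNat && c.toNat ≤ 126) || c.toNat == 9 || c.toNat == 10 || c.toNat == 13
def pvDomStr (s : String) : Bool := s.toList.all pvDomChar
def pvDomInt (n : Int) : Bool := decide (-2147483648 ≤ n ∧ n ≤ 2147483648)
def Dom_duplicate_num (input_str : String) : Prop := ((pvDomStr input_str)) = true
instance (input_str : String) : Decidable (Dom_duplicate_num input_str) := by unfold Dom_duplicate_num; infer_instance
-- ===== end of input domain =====

-- B replaces A's sort-then-indexwise while-loop with a length guard plus one set comparison (objective: simpler).

-- ===== PORT A =====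
-- str_to_ls: builds a list from the string, appending one character at a time
def strToLs (string : String) : List Char :=
  string.toList.foldl (fun acc c => acc ++ [c]) []

def zToN : List Char := ['0', '1', '2', '3', '4', '5', '6', '7', '8', '9']

-- the while loop of A: i goes 0,1,…; every iteration either returns or increments i
def dupLoop (input_ls : List Char) (i : Nat) : Bool :=
  if i ≤ zToN.length then
    if input_ls.length ≠ zToN.length then false
    else if i = zToN.length then true
    else
      match PySem.List.pyGet? input_ls (i : Int), PySem.List.pyGet? zToN (i : Int) with
      | some a, some b => if a = b then dupLoop input_ls (i + 1) else decide (a = b)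
      | _, _ => false  -- IndexError; unreachable (i < length = 10)
  else false  -- while loop falls through returning None; unreachable in Python (i = 10 returns True)
termination_by zToN.length + 1 - i

def duplicate_num (input_str : String) : Bool :=
  dupLoop (PySem.List.sorted (strToLs input_str) (fun x => x) false) 0

-- ===== PORT B =====
def duplicate_num_alt (input_str : String) : Bool :=
  decide (PySem.Str.len input_str = 10) &&
    PySem.Set.equal (PySem.Set.ofList input_str.toList)
      (PySem.Set.ofList ("0123456789".toList))

-- ===== PRECONDITION & SPEC =====
def Spec_duplicate_num (input_str : String) (out : Bool) : Prop := out = duplicate_num_alt input_str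
instance (input_str : String) (out : Bool) : Decidable (Spec_duplicate_num input_str out) := by unfold Spec_duplicate_num; infer_instance

-- ===== CLAIM (what is proved, stated in full; the proofs are below) =====
def Claim_equal_duplicate_num : Prop := ∀ (input_str : String), Dom_duplicate_num input_str → Spec_duplicate_num input_str (duplicate_num input_str)

-- ===== LEMMAS AND PROOFS =====

theorem strToLs_eq (s : String) : strToLs s = s.toList := by
  unfold strToLs
  simp [pysem]
  induction s.toList with
  | nil => rfl
  | cons a t ih => simp [ih]

-- loop characterization: on a length-10 list, dupLoop L i decides L.drop i = zToN.drop i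
theorem dupLoop_eq (L : List Char) (hL : L.length = 10) (i : Nat) (hi : i ≤ 10) :
    dupLoop L i = decide (L.drop i = zToN.drop i) := by
  have hz : zToN.length = 10 := by decide
  by_cases h10 : i = 10
  · subst h10
    rw [dupLoop]
    simp [hz, hL, List.drop_eq_nil_of_le (le_of_eq hL), List.drop_eq_nil_of_le (le_of_eq hz)]
  · have hlt : i < 10 := by omega
    rw [dupLoop]
    have hgL : PySem.List.pyGet? L (i : Int) = some L[i] := by
      simp [PySem.List.pyGet?_natCast]
    have hgz : PySem.List.pyGet? zToN (i : Int) = some zToN[i] := by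
      simp [PySem.List.pyGet?_natCast]
    rw [hgL, hgz]
    simp only [hz, hL, if_pos (by omega : i ≤ 10), if_neg (by omega : ¬ (10 : Nat) ≠ 10),
      if_neg h10]
    rw [List.drop_eq_getElem_cons (by omega : i < L.length),
      List.drop_eq_getElem_cons (by omega : i < zToN.length)]
    by_cases he : L[i] = zToN[i]
    · rw [if_pos he, dupLoop_eq L hL (i+1) (by omega)]
      simp only [List.cons_eq_cons, decide_eq_decide]
      tauto
    · rw [if_neg he]
      simp only [List.cons_eq_cons, decide_eq_decide]
      tauto
termination_by 10 - i

-- A decides "sorted(input) = '0123456789' as a char list"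
theorem dupA_eq (s : String) :
    duplicate_num s
      = decide (PySem.List.sorted s.toList (fun x => x) false = zToN) := by
  unfold duplicate_num
  rw [strToLs_eq]
  set L := PySem.List.sorted s.toList (fun x => x) false with hLdef
  have hlen : L.length = s.toList.length := PySem.List.length_sorted s.toList (fun x => x) false
  by_cases h : L.length = 10
  · have := dupLoop_eq L h 0 (by omega)
    simpa using this
  · rw [dupLoop]
    have hz : zToN.length = 10 := by decide
    rw [if_pos (by omega), if_pos (by omega)]
    have : ¬ L = zToN := fun he => h (by rw [he]; decide)
    simp [this]

-- the heart of the equivalence: sorted = digits ↔ length 10 ∧ same character set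
theorem sorted_eq_iff (l : List Char) :
    PySem.List.sorted l (fun x => x) false = zToN
      ↔ l.length = 10 ∧ ∀ x, x ∈ l ↔ x ∈ zToN := by
  constructor
  · intro h
    have hp : (PySem.List.sorted l (fun x => x) false).Perm l :=
      PySem.List.sorted_perm l (fun x => x) false
    rw [h] at hp
    constructor
    · have := hp.length_eq; simpa using this.symm
    · intro x; exact ⟨fun hx => hp.mem_iff.mpr hx, fun hx => hp.mem_iff.mp hx⟩
  · rintro ⟨hlen, hmem⟩
    have hnd : zToN.Nodup := by decide
    have hsub : zToN ⊆ l := fun x hx => (hmem x).mpr hx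
    have hsp : List.Subperm zToN l := hnd.subperm hsub
    have hperm : zToN.Perm l := hsp.perm_of_length_le (by simp [hlen]; decide)
    exact PySem.List.sorted_eq_of_perm_of_pairwise_lt l zToN (fun x => x) hperm (by decide)

-- B decides the same proposition
theorem dupB_eq (s : String) :
    duplicate_num_alt s
      = decide (PySem.List.sorted s.toList (fun x => x) false = zToN) := by
  unfold duplicate_num_alt
  rw [Bool.eq_iff_iff]
  simp only [Bool.and_eq_true, decide_eq_true_eq, PySem.Set.equal_iff, PySem.Set.mem_ofList]
  rw [sorted_eq_iff]
  have : ("0123456789".toList) = zToN := by decide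
  rw [this]
  simp [pysem]
  intro _
  omega

-- ===== VERDICT (by name: the statement is the Claim_ definition above) =====
theorem duplicate_num_spec : Claim_equal_duplicate_num := by
  intro s _
  unfold Spec_duplicate_num
  rw [dupA_eq, dupB_eq]
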